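-- pv_equiv track=rewrite | github.com/sxxzin/Algorithm | Algorithm01_Stack_Queue/StockPrice.py | solution
-- ===== SOURCE A (Python) =====
-- from collections import deque
--
-- def solution(prices):
--     answer = []
--     prices=deque(prices)
--     while prices:
--         temp=prices.popleft()
--         cnt=0
--         for i in prices:
--             if temp>i:
--                 cnt += 1
--                 break
--             cnt +=1
--         answer.append(cnt)
--     return answer
-- ===== SOURCE B (Python) =====
-- def solution(prices):
--     n = len(prices)
--     answer = [0] * n
--     stack = []
--     for j in range(n):
--         p = prices[j]
--         while stack and prices[stack[-1]] > p:
--             t = stack.pop()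
--             answer[t] = j - t
--         stack.append(j)
--     for t in stack:
--         answer[t] = n - 1 - t
--     return answer
-- ===== Notes on version B (the rewrite author's own statement) =====
-- stated objective: faster
-- what changed: Replaced the per-element forward rescan of the remaining deque with a single pass keeping a monotonic stack of indices, assigning each duration when its price drops (leftovers filled at the end).
import Mathlib
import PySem

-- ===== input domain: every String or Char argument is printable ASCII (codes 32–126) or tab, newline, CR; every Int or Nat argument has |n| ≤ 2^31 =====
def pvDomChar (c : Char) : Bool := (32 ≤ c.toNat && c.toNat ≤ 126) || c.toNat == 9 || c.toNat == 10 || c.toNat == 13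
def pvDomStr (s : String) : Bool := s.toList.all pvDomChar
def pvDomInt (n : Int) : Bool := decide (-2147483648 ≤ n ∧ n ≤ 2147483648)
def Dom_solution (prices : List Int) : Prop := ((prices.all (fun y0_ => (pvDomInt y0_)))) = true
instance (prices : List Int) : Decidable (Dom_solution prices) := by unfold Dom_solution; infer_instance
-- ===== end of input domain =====

-- B replaces A's per-element rescan of the remaining prices with a one-pass monotonic
-- stack of indices (objective: faster).

-- ===== PORT A =====
-- the inner `for i in prices: if temp>i: cnt+=1; break / cnt+=1` loop
def countA (p : Int) : List Int → Int
  | [] => 0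
  | x :: xs => if p > x then 1 else 1 + countA p xs

-- the outer `while prices: temp=prices.popleft(); … answer.append(cnt)` loop
def solution (prices : List Int) : List Int :=
  match prices with
  | [] => []
  | p :: rest => countA p rest :: solution rest

-- ===== PORT B =====
-- the inner `while stack and prices[stack[-1]] > p: t=stack.pop(); answer[t]=j-t`
-- (the stack is kept top-first, so python's stack[-1]/pop() is the head here)
def popLoop (prices : List Int) (p : Int) (j : Nat) :
    List Nat → List Int → List Nat × List Int
  | [], ans => ([], ans)
  | t :: st, ans =>
      if prices.getD t 0 > p then
        popLoop prices p j st (ans.set t ((j : Int) - (t : Int)))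
      else (t :: st, ans)

-- the main `for j in range(n)` loop, then the fill-up `for t in stack`
-- (python iterates the leftover stack bottom-first, hence the reverse)
def solution_alt (prices : List Int) : List Int :=
  let n := prices.length
  let s := (List.range n).foldl
    (fun (s : List Int × List Nat) (j : Nat) =>
      let p := prices.getD j 0
      let r := popLoop prices p j s.2 s.1
      (r.2, j :: r.1))
    (List.replicate n 0, [])
  (s.2.reverse).foldl (fun ans t => ans.set t ((n : Int) - 1 - (t : Int))) s.1

-- ===== PRECONDITION & SPEC =====
def Spec_solution (prices : List Int) (out : List Int) : Prop := out = solution_alt prices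
instance (prices : List Int) (out : List Int) : Decidable (Spec_solution prices out) := by unfold Spec_solution; infer_instance

-- ===== CLAIM (what is proved, stated in full; the proofs are below) =====
def Claim_equal_solution : Prop := ∀ (prices : List Int), Dom_solution prices → Spec_solution prices (solution prices)

-- ===== LEMMAS AND PROOFS =====

-- invariant of B's main loop after the first j elements have been processed:
-- lengths agree; the stack holds strictly decreasing indices < j whose prices
-- (top-first) are non-increasing and have seen no later drop yet; every already
-- finished index t stores (first drop position) - t.
def StackInv (prices : List Int) (j : Nat) (ans : List Int) (st : List Nat) : Prop :=
  ans.length = prices.length ∧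
  (∀ t ∈ st, t < j) ∧
  List.Pairwise (fun a b => b < a) st ∧
  List.Pairwise (fun a b => prices.getD b 0 ≤ prices.getD a 0) st ∧
  (∀ t ∈ st, ∀ m, t < m → m < j → ¬ (prices.getD m 0 < prices.getD t 0)) ∧
  (∀ t, t < j → t ∉ st →
    ∃ k, t < k ∧ k < j ∧ prices.getD k 0 < prices.getD t 0 ∧
      (∀ m, t < m → m < k → ¬ (prices.getD m 0 < prices.getD t 0)) ∧
      ans.getD t 0 = (k : Int) - (t : Int))

theorem countA_no (p : Int) (rest : List Int) (h : ∀ x ∈ rest, ¬ x < p) :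
    countA p rest = (rest.length : Int) := by
  induction rest with
  | nil => simp [countA]
  | cons x xs ih =>
    have hx := h x (by simp)
    rw [countA, if_neg (by exact hx), ih (fun y hy => h y (by simp [hy]))]
    simp only [List.length_cons]
    push_cast
    ring

theorem countA_first (p : Int) (rest : List Int) (k : Nat) (hk : k < rest.length)
    (hbefore : ∀ i, i < k → ¬ rest.getD i 0 < p) (hat : rest.getD k 0 < p) :
    countA p rest = (k : Int) + 1 := by
  induction rest generalizing k with
  | nil => simp at hk
  | cons x xs ih =>
    cases k with
    | zero =>
      simp only [List.getD_cons_zero] at hat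
      simp [countA, hat]
    | succ k =>
      have hx : ¬ x < p := by
        have := hbefore 0 (Nat.succ_pos k)
        simpa using this
      have := ih k (by simpa using hk)
        (fun i hi => by
          have := hbefore (i + 1) (by omega)
          simpa using this)
        (by simpa using hat)
      rw [countA, if_neg (by exact hx), this]
      push_cast
      ring

-- A's output, elementwise
theorem solution_length (prices : List Int) : (solution prices).length = prices.length := by
  induction prices with
  | nil => simp [solution]
  | cons p rest ih => simp [solution, ih]

theorem solution_getD (prices : List Int) (t : Nat) (ht : t < prices.length) :
    (solution prices).getD t 0 = countA (prices.getD t 0) (prices.drop (t + 1)) := by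
  induction prices generalizing t with
  | nil => simp at ht
  | cons p rest ih =>
    cases t with
    | zero => simp [solution]
    | succ t =>
      simp only [solution, List.getD_cons_succ, List.drop_succ_cons]
      exact ih t (by simpa using ht)

-- getD through drop
theorem getD_drop (l : List Int) (i j : Nat) :
    (l.drop i).getD j 0 = l.getD (i + j) 0 := by
  simp [List.getD, List.getElem?_drop]

theorem mem_drop_getD (x : Int) (l : List Int) (t : Nat) (hx : x ∈ l.drop (t + 1)) :
    ∃ m, t < m ∧ m < l.length ∧ l.getD m 0 = x := by
  obtain ⟨i, hi, he⟩ := List.mem_iff_getElem.1 hx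
  refine ⟨t + 1 + i, by omega, by simp at hi; omega, ?_⟩
  rw [← getD_drop, List.getD_eq_getElem _ 0 hi, he]

-- spec of the pop loop
theorem popLoop_spec (prices : List Int) (p : Int) (j : Nat) (st : List Nat) (ans : List Int)
    (hlt : ∀ t ∈ st, t < j) (hjlen : j ≤ ans.length)
    (hdec : List.Pairwise (fun a b => b < a) st)
    (hmono : List.Pairwise (fun a b => prices.getD b 0 ≤ prices.getD a 0) st) :
    (popLoop prices p j st ans).1.IsSuffix st ∧
    (∀ t ∈ (popLoop prices p j st ans).1, ¬ p < prices.getD t 0) ∧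
    (popLoop prices p j st ans).2.length = ans.length ∧
    (∀ u ∈ st, u ∉ (popLoop prices p j st ans).1 →
      p < prices.getD u 0 ∧ (popLoop prices p j st ans).2.getD u 0 = (j : Int) - (u : Int)) ∧
    (∀ u, u ∉ st → (popLoop prices p j st ans).2.getD u 0 = ans.getD u 0) := by
  induction st generalizing ans with
  | nil =>
    refine ⟨List.nil_suffix, ?_, ?_, ?_, ?_⟩ <;> simp [popLoop]
  | cons t st ih =>
    by_cases hcond : prices.getD t 0 > p
    · have hrec := ih (ans.set t ((j : Int) - (t : Int)))
        (fun u hu => hlt u (by simp [hu]))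
        (by rw [List.length_set]; exact hjlen)
        hdec.tail hmono.tail
      have hts : t ∉ st := fun h => lt_irrefl t ((List.pairwise_cons.1 hdec).1 t h)
      have htlen : t < ans.length := lt_of_lt_of_le (hlt t (by simp)) hjlen
      simp only [popLoop, if_pos hcond]
      obtain ⟨hsuf, hok, hlen, hpop, hkeep⟩ := hrec
      refine ⟨hsuf.trans (List.suffix_cons t st), hok, by rw [hlen, List.length_set], ?_, ?_⟩
      · intro u hu hunot
        rcases List.mem_cons.1 hu with rfl | hu'
        · refine ⟨hcond, ?_⟩
          rw [hkeep u hts, List.getD_eq_getElem?_getD, List.getElem?_set_self (by omega)]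
          rfl
        · exact hpop u hu' hunot
      · intro u hu
        have hu1 : u ∉ st := fun h => hu (by simp [h])
        have hu2 : u ≠ t := fun h => hu (by simp [h])
        rw [hkeep u hu1, List.getD_eq_getElem?_getD, List.getElem?_set_ne (by omega),
          ← List.getD_eq_getElem?_getD]
    · simp only [popLoop, if_neg hcond]
      refine ⟨List.suffix_refl _, ?_, ?_, ?_, ?_⟩
      · intro u hu
        rcases List.mem_cons.1 hu with rfl | hu'
        · exact fun h => hcond h
        · have h1 : prices.getD u 0 ≤ prices.getD t 0 :=
            (List.pairwise_cons.1 hmono).1 u hu'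
          exact fun h => hcond (lt_of_lt_of_le h h1)
      · trivial
      · intro u hu hunot
        exact absurd hu hunot
      · intro u hu
        trivial

-- one step of B's main loop preserves the invariant
theorem step_inv (prices : List Int) (j : Nat) (ans : List Int) (st : List Nat)
    (hinv : StackInv prices j ans st) (hj : j < prices.length) :
    StackInv prices (j + 1)
      (popLoop prices (prices.getD j 0) j st ans).2
      (j :: (popLoop prices (prices.getD j 0) j st ans).1) := by
  obtain ⟨hlen, hltj, hdec, hmono, hnodrop, hdone⟩ := hinv
  obtain ⟨hsuf, hok, hlen', hpop, hkeep⟩ :=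
    popLoop_spec prices (prices.getD j 0) j st ans hltj (by omega) hdec hmono
  have hsub : ∀ t ∈ (popLoop prices (prices.getD j 0) j st ans).1, t ∈ st :=
    fun t ht => hsuf.subset ht
  refine ⟨by rw [hlen', hlen], ?_, ?_, ?_, ?_, ?_⟩
  · intro t ht
    rcases List.mem_cons.1 ht with rfl | ht'
    · omega
    · exact Nat.lt_succ_of_lt (hltj t (hsub t ht'))
  · exact List.pairwise_cons.2 ⟨fun t ht => hltj t (hsub t ht), hdec.sublist hsuf.sublist⟩
  · exact List.pairwise_cons.2
      ⟨fun t ht => not_lt.1 (hok t ht), hmono.sublist hsuf.sublist⟩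
  · intro t ht m htm hmj
    rcases List.mem_cons.1 ht with rfl | ht'
    · omega
    · rcases Nat.lt_succ_iff_lt_or_eq.1 hmj with hmj' | rfl
      · exact hnodrop t (hsub t ht') m htm hmj'
      · exact hok t ht'
  · intro t ht hnot
    have htj : t ≠ j := fun h => hnot (by simp [h])
    have ht' : t < j := by omega
    have hnot' : t ∉ (popLoop prices (prices.getD j 0) j st ans).1 :=
      fun h => hnot (List.mem_cons_of_mem j h)
    by_cases hts : t ∈ st
    · obtain ⟨hdrop, hval⟩ := hpop t hts hnot'
      exact ⟨j, ht', by omega, hdrop, fun m h1 h2 => hnodrop t hts m h1 h2, hval⟩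
    · obtain ⟨k, h1, h2, h3, h4, h5⟩ := hdone t ht' hts
      exact ⟨k, h1, by omega, h3, h4, by rw [hkeep t hts]; exact h5⟩

-- the invariant holds after the whole main loop
theorem mainLoop_inv (prices : List Int) (j : Nat) (hj : j ≤ prices.length) :
    StackInv prices j
      (((List.range j).foldl
        (fun (s : List Int × List Nat) (j : Nat) =>
          let p := prices.getD j 0
          let r := popLoop prices p j s.2 s.1
          (r.2, j :: r.1))
        (List.replicate prices.length 0, [])).1)
      (((List.range j).foldl
        (fun (s : List Int × List Nat) (j : Nat) =>
          let p := prices.getD j 0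
          let r := popLoop prices p j s.2 s.1
          (r.2, j :: r.1))
        (List.replicate prices.length 0, [])).2) := by
  induction j with
  | zero =>
    refine ⟨by simp, by simp, by simp, by simp, by simp, ?_⟩
    intro t ht
    exact absurd ht (by omega)
  | succ j ih =>
    have hstep := step_inv prices j _ _ (ih (by omega)) (by omega)
    rw [List.range_succ, List.foldl_append, List.foldl_cons, List.foldl_nil]
    exact hstep

-- the fill-up loop: untouched indices keep their value, and the length is kept
theorem fill_getD_not_mem (c : Int) (L : List Nat) (ans : List Int) (t : Nat) (ht : t ∉ L) :
    (L.foldl (fun ans u => ans.set u (c - (u : Int))) ans).getD t 0 = ans.getD t 0 := by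
  induction L generalizing ans with
  | nil => rfl
  | cons u L ih =>
    have h1 : t ∉ L := fun h => ht (by simp [h])
    have h2 : t ≠ u := fun h => ht (by simp [h])
    rw [List.foldl_cons, ih (ans.set u _) h1, List.getD_eq_getElem?_getD,
      List.getElem?_set_ne (by omega), ← List.getD_eq_getElem?_getD]

-- the fill-up loop: indices in the list receive c - t
theorem fill_getD_mem (c : Int) (L : List Nat) (ans : List Int) (t : Nat)
    (hnd : L.Nodup) (hin : ∀ u ∈ L, u < ans.length) (ht : t ∈ L) :
    (L.foldl (fun ans u => ans.set u (c - (u : Int))) ans).getD t 0 = c - (t : Int) := by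
  induction L generalizing ans with
  | nil => simp at ht
  | cons u L ih =>
    rw [List.foldl_cons]
    rcases List.mem_cons.1 ht with rfl | ht'
    · rw [fill_getD_not_mem c L _ t (List.nodup_cons.1 hnd).1,
        List.getD_eq_getElem?_getD, List.getElem?_set_self (hin t (by simp))]
      rfl
    · exact ih (ans.set u _) (List.nodup_cons.1 hnd).2
        (fun v hv => by rw [List.length_set]; exact hin v (by simp [hv])) ht'

theorem fill_length (c : Int) (L : List Nat) (ans : List Int) :
    (L.foldl (fun ans u => ans.set u (c - (u : Int))) ans).length = ans.length := by
  induction L generalizing ans with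
  | nil => rfl
  | cons u L ih => rw [List.foldl_cons, ih, List.length_set]

theorem solution_alt_length (prices : List Int) :
    (solution_alt prices).length = prices.length := by
  obtain ⟨hlen, -, -, -, -, -⟩ := mainLoop_inv prices prices.length (le_refl _)
  set s := ((List.range prices.length).foldl
        (fun (s : List Int × List Nat) (j : Nat) =>
          let p := prices.getD j 0
          let r := popLoop prices p j s.2 s.1
          (r.2, j :: r.1))
        (List.replicate prices.length 0, [])) with hs
  have halt : solution_alt prices =
      (s.2.reverse).foldl
        (fun ans u => ans.set u (((prices.length : Int) - 1) - (u : Int))) s.1 := rfl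
  rw [halt, fill_length ((prices.length : Int) - 1)]
  exact hlen

-- the main elementwise agreement
theorem getD_agree (prices : List Int) (t : Nat) (ht : t < prices.length) :
    (solution_alt prices).getD t 0 = countA (prices.getD t 0) (prices.drop (t + 1)) := by
  obtain ⟨hlen, hltj, hdec, hmono, hnodrop, hdone⟩ :=
    mainLoop_inv prices prices.length (le_refl _)
  set s := ((List.range prices.length).foldl
        (fun (s : List Int × List Nat) (j : Nat) =>
          let p := prices.getD j 0
          let r := popLoop prices p j s.2 s.1
          (r.2, j :: r.1))
        (List.replicate prices.length 0, [])) with hs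
  have halt : solution_alt prices =
      (s.2.reverse).foldl
        (fun ans u => ans.set u (((prices.length : Int) - 1) - (u : Int))) s.1 := rfl
  have hdroplen : (prices.drop (t + 1)).length = prices.length - (t + 1) := by simp
  by_cases hmem : t ∈ s.2
  · -- still on the stack at the end: no later drop, A's inner loop runs off the end
    have hval : (solution_alt prices).getD t 0 = ((prices.length : Int) - 1) - (t : Int) := by
      rw [halt]
      exact fill_getD_mem _ s.2.reverse s.1 t
        (by rw [List.nodup_reverse]; exact (hdec.imp (fun hh => Nat.ne_of_gt hh)))
        (fun u hu => by rw [hlen]; exact hltj u (List.mem_reverse.1 hu))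
        (List.mem_reverse.2 hmem)
    rw [hval, countA_no]
    · rw [hdroplen]
      have h1 : t + 1 ≤ prices.length := ht
      push_cast [Nat.cast_sub h1]
      ring
    · intro x hx hcontra
      obtain ⟨m, hm1, hm2, hm3⟩ := mem_drop_getD x prices t hx
      exact hnodrop t hmem m hm1 hm2 (by rw [hm3]; exact hcontra)
  · -- finished: the stored value is (first drop) - t, which is what countA returns
    obtain ⟨k, hk1, hk2, hk3, hk4, hk5⟩ := hdone t ht hmem
    have hval : (solution_alt prices).getD t 0 = (k : Int) - (t : Int) := by
      rw [halt, fill_getD_not_mem _ _ _ t (fun h => hmem (List.mem_reverse.1 h))]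
      exact hk5
    have hcount : countA (prices.getD t 0) (prices.drop (t + 1)) = ((k - (t + 1) : Nat) : Int) + 1 := by
      apply countA_first
      · rw [hdroplen]; omega
      · intro i hi
        rw [getD_drop]
        exact hk4 (t + 1 + i) (by omega) (by omega)
      · rw [getD_drop]
        have : t + 1 + (k - (t + 1)) = k := by omega
        rw [this]
        exact hk3
    rw [hval, hcount]
    have h1 : t + 1 ≤ k := hk1
    push_cast [Nat.cast_sub h1]
    ring

-- ===== VERDICT (by name: the statement is the Claim_ definition above) =====
theorem solution_spec : Claim_equal_solution := by
  intro prices _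
  unfold Spec_solution
  apply List.ext_getElem
  · rw [solution_length, solution_alt_length]
  · intro i h1 h2
    have hi : i < prices.length := by rwa [solution_length] at h1
    rw [← List.getD_eq_getElem (solution prices) 0 h1, ← List.getD_eq_getElem _ 0 h2,
      solution_getD prices i hi, getD_agree prices i hi]
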